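-- pv_equiv track=rewrite | github.com/corpnewt/gibMacOS | Scripts/diskwin.py | _get_rows
-- ===== SOURCE A (Python) =====
-- def _get_rows(row_list):
--     rows = []
--     last_row = []
--     for row in row_list:
--         if not row.strip(): # Empty
--             if last_row: # Got a row at least - append it and reset
--                 rows.append(last_row)
--                 last_row = []
--             continue # Skip anything else
--         # Not an empty row - let's try to get the info
--         try: last_row.append(" : ".join(row.split(" : ")[1:]))
--         except: pass
--     return rows
-- ===== SOURCE B (Python) =====
-- def _get_rows(row_list):
--     """Collect records from a report: a record is a run of non-blank rows
--     terminated by a blank row; each row's payload is everything after the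
--     first ' : ' separator."""
--     records = []
--     n = len(row_list)
--     lo = 0
--     while True:
--         while lo < n and not row_list[lo].strip():
--             lo += 1
--         hi = lo
--         while hi < n and row_list[hi].strip():
--             hi += 1
--         if hi == n:
--             return records
--         records.append([" : ".join(r.split(" : ")[1:]) for r in row_list[lo:hi]])
--         lo = hi + 1
-- ===== Notes on version B (the rewrite author's own statement) =====
-- stated objective: alternative
-- what changed: Replaces A's element-wise fold over rows carrying mutable (rows, last_row) accumulators by an index-based two-pointer scan that skips blank rows, finds the end of each non-blank run, and emits the rendered slice of each blank-terminated run.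
import Mathlib
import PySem

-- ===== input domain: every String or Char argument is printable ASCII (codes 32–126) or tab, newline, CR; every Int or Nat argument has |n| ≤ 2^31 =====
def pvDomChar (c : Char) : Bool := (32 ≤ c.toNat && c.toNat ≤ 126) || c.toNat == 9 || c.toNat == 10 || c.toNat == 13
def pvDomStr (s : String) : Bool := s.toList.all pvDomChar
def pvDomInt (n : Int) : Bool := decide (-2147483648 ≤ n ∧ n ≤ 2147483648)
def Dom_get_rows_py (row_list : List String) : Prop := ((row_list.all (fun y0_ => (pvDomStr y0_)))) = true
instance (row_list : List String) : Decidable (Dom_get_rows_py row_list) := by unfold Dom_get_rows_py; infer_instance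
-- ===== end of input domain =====

-- B replaces A's element-wise fold with (rows, last_row) accumulators by an
-- index-based two-pointer scan (skip blanks, find the end of the run, emit the
-- rendered slice of each blank-terminated run); same result, similar cost.

-- ===== PORT A =====
-- literal port of A's loop: fold over the rows carrying (rows, last_row);
-- row.split(" : ") never raises (sep ≠ ""), so the try/except is the plain expression
def get_rows_py (row_list : List String) : List (List String) :=
  (row_list.foldl
    (fun (st : List (List String) × List String) row =>
      if PySem.Str.strip row == "" then
        (if st.2 ≠ [] then (st.1 ++ [st.2], ([] : List String)) else st)
      else
        (st.1, st.2 ++ [PySem.Str.join " : " (((PySem.Str.split? row " : ").getD []).drop 1)]))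
    ([], [])).1

-- ===== PORT B =====
def pvBlank (r : String) : Bool := PySem.Str.strip r == ""

-- " : ".join(r.split(" : ")[1:]); split? with sep ≠ "" is always some, getD [] is exact
def pvField (r : String) : String :=
  PySem.Str.join " : " (((PySem.Str.split? r " : ").getD []).drop 1)

-- Source B's inner `while i < n and p(row_list[i]): i += 1`, returning the final i
def pvAdvance (p : String → Bool) (xs : List String) (i : Nat) : Nat :=
  if h : i < xs.length then
    if p xs[i] then pvAdvance p xs (i + 1) else i
  else i
termination_by xs.length - i

-- needed by pvLoop's termination proof
theorem pvAdvance_ge (p : String → Bool) (xs : List String) (i : Nat) :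
    i ≤ pvAdvance p xs i := by
  unfold pvAdvance
  split_ifs with h1 h2
  · exact le_trans (Nat.le_succ i) (pvAdvance_ge p xs (i + 1))
  · exact le_refl i
  · exact le_refl i
termination_by xs.length - i

-- Source B's outer `while True` loop; `hi == n` is written `n ≤ hi` (hi never exceeds n
-- on reachable states; `≤` makes totality evident)
def pvLoop (xs : List String) (records : List (List String)) (lo : Nat) :
    List (List String) :=
  if xs.length ≤ pvAdvance (fun r => !pvBlank r) xs (pvAdvance pvBlank xs lo) then records
  else
    pvLoop xs
      (records ++ [(PySem.List.slice xs (some ((pvAdvance pvBlank xs lo : Nat) : Int))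
        (some ((pvAdvance (fun r => !pvBlank r) xs (pvAdvance pvBlank xs lo) : Nat) : Int))).map pvField])
      (pvAdvance (fun r => !pvBlank r) xs (pvAdvance pvBlank xs lo) + 1)
termination_by xs.length - lo
decreasing_by
  have h1 := pvAdvance_ge pvBlank xs lo
  have h2 := pvAdvance_ge (fun r => !pvBlank r) xs (pvAdvance pvBlank xs lo)
  omega

def get_rows_py_alt (row_list : List String) : List (List String) :=
  pvLoop row_list [] 0

-- ===== PRECONDITION & SPEC =====
def Spec_get_rows_py (row_list : List String) (out : List (List String)) : Prop :=
  out = get_rows_py_alt row_list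
instance (row_list : List String) (out : List (List String)) :
    Decidable (Spec_get_rows_py row_list out) := by unfold Spec_get_rows_py; infer_instance

-- ===== CLAIM =====
def Claim_equal_get_rows_py : Prop :=
  ∀ (row_list : List String), Dom_get_rows_py row_list →
    Spec_get_rows_py row_list (get_rows_py row_list)

-- ===== LEMMAS AND PROOFS =====

-- A's loop body, named for the proofs
def pvStep (st : List (List String) × List String) (row : String) :
    List (List String) × List String :=
  if PySem.Str.strip row == "" then
    (if st.2 ≠ [] then (st.1 ++ [st.2], ([] : List String)) else st)
  else
    (st.1, st.2 ++ [pvField row])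

theorem get_rows_py_eq_step (xs : List String) :
    get_rows_py xs = (xs.foldl pvStep ([], [])).1 := rfl

-- common reference shape: parse the suffix structure directly
def pvParse (rows : List String) : List (List String) :=
  if ((rows.dropWhile pvBlank).takeWhile (fun r => !pvBlank r)).length
      = (rows.dropWhile pvBlank).length then []
  else ((rows.dropWhile pvBlank).takeWhile (fun r => !pvBlank r)).map pvField
    :: pvParse ((rows.dropWhile pvBlank).drop
        (((rows.dropWhile pvBlank).takeWhile (fun r => !pvBlank r)).length + 1))
termination_by rows.length
decreasing_by
  have h1 := List.length_dropWhile_le pvBlank rows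
  have h2 := (List.takeWhile_prefix (l := rows.dropWhile pvBlank)
    (p := fun r => !pvBlank r)).length_le
  simp only [List.length_drop]
  omega

theorem dropWhile_eq_drop_len (p : String → Bool) (l : List String) :
    l.dropWhile p = l.drop (l.takeWhile p).length := by
  induction l with
  | nil => rfl
  | cons a l ih =>
    by_cases h : p a = true <;>
      simp [h, ih]

theorem take_takeWhile_len (p : String → Bool) (l : List String) :
    l.take (l.takeWhile p).length = l.takeWhile p := by
  induction l with
  | nil => rfl
  | cons a l ih =>
    by_cases h : p a = true <;>
      simp [h, ih]

theorem pvAdvance_eq (p : String → Bool) (xs : List String) (i : Nat)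
    (h : i ≤ xs.length) :
    pvAdvance p xs i = i + ((xs.drop i).takeWhile p).length := by
  unfold pvAdvance
  split_ifs with h1 h2
  · have hdrop : xs.drop i = xs[i] :: xs.drop (i + 1) := List.drop_eq_getElem_cons h1
    rw [pvAdvance_eq p xs (i + 1) h1, hdrop, List.takeWhile_cons, if_pos h2]
    simp; omega
  · have hdrop : xs.drop i = xs[i] :: xs.drop (i + 1) := List.drop_eq_getElem_cons h1
    rw [hdrop, List.takeWhile_cons, if_neg (by simp [h2])]
    simp
  · have : xs.drop i = [] := List.drop_eq_nil_of_le (by omega)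
    simp [this]
termination_by xs.length - i

theorem foldl_pvStep_fst (xs : List String) :
    ∀ (rows : List (List String)) (last : List String),
      (xs.foldl pvStep (rows, last)).1 = rows ++ (xs.foldl pvStep ([], last)).1 := by
  induction xs with
  | nil => intro rows last; simp
  | cons x xs ih =>
    intro rows last
    have hstep : pvStep (rows, last) x
        = (rows ++ (pvStep ([], last) x).1, (pvStep ([], last) x).2) := by
      unfold pvStep; split_ifs with h1 h2 <;> simp_all
    rcases hpx : pvStep ([], last) x with ⟨d1, d2⟩
    rw [hpx] at hstep
    simp only [List.foldl_cons, hstep, hpx]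
    rw [ih (rows ++ d1) d2, ih d1 d2]
    simp

theorem foldl_pvStep_blanks (g : List String) (h : ∀ y ∈ g, pvBlank y = true) :
    ∀ rows, g.foldl pvStep (rows, []) = (rows, []) := by
  induction g with
  | nil => intro rows; rfl
  | cons y g ih =>
    intro rows
    have hy : (PySem.Str.strip y == "") = true := h y List.mem_cons_self
    have hstep : pvStep (rows, []) y = (rows, []) := by
      unfold pvStep; rw [if_pos hy, if_neg (by simp)]
    simp only [List.foldl_cons, hstep]
    exact ih (fun z hz => h z (List.mem_cons_of_mem _ hz)) rows

theorem foldl_pvStep_nonblanks (g : List String) (h : ∀ y ∈ g, pvBlank y = false) :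
    ∀ rows last, g.foldl pvStep (rows, last) = (rows, last ++ g.map pvField) := by
  induction g with
  | nil => intro rows last; simp
  | cons y g ih =>
    intro rows last
    have hy : ¬ ((PySem.Str.strip y == "") = true) := by
      have := h y List.mem_cons_self
      simpa [pvBlank] using this
    have hstep : pvStep (rows, last) y = (rows, last ++ [pvField y]) := by
      unfold pvStep; rw [if_neg hy]
    simp only [List.foldl_cons, hstep]
    rw [ih (fun z hz => h z (List.mem_cons_of_mem _ hz))]
    simp

-- A's fold computes pvParse
set_option maxRecDepth 2048 in
theorem foldl_pvStep_eq_parse (n : Nat) :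
    ∀ xs : List String, xs.length ≤ n →
      (xs.foldl pvStep ([], [])).1 = pvParse xs := by
  induction n with
  | zero =>
    intro xs hxs
    have : xs = [] := List.length_eq_zero_iff.mp (Nat.le_zero.mp hxs)
    subst this; rw [pvParse]; simp
  | succ n ih =>
    intro xs hxs
    set rows' := xs.dropWhile pvBlank with hrows'
    set run := rows'.takeWhile (fun r => !pvBlank r) with hrun
    have hxsplit : xs = xs.takeWhile pvBlank ++ rows' :=
      (List.takeWhile_append_dropWhile).symm
    have hblanks : ∀ y ∈ xs.takeWhile pvBlank, pvBlank y = true := by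
      intro y hy; simpa using List.mem_takeWhile_imp hy
    have hrunnb : ∀ y ∈ run, pvBlank y = false := by
      intro y hy
      have := List.mem_takeWhile_imp hy
      simpa using this
    have hfold1 : (xs.foldl pvStep ([], [])).1 = (rows'.foldl pvStep ([], [])).1 := by
      conv_lhs => rw [hxsplit]
      rw [List.foldl_append, foldl_pvStep_blanks _ hblanks]
    by_cases hlen : run.length = rows'.length
    · -- no terminating blank: rows' is all one non-blank run, last_row never flushed
      have hall : run = rows' := (List.takeWhile_prefix _).eq_of_length hlen
      have : rows'.foldl pvStep ([], []) = ([], rows'.map pvField) := by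
        rw [← hall]
        exact foldl_pvStep_nonblanks run hrunnb [] []
      rw [hfold1, this, pvParse]
      simp only [← hrows', ← hrun, if_pos hlen]
    · -- rows' = run ++ b :: rest with b blank
      have hsplit2 : rows' = run ++ rows'.dropWhile (fun r => !pvBlank r) :=
        (List.takeWhile_append_dropWhile).symm
      rcases hrest : rows'.dropWhile (fun r => !pvBlank r) with _ | ⟨b, rest⟩
      · exfalso
        rw [hrest] at hsplit2
        simp at hsplit2
        rw [← hsplit2] at hlen
        exact hlen rfl
      · have hb : pvBlank b = true := by
          have := List.head?_dropWhile_not (fun r => !pvBlank r) rows'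
          rw [hrest] at this
          simpa using this
        have hrun_ne : run ≠ [] := by
          intro hr
          rcases hrows'' : rows' with _ | ⟨x, rx⟩
          · rw [hrows''] at hsplit2 hrest
            simp [List.dropWhile_nil] at hrest
          · have hx : pvBlank x = false := by
              have := List.head?_dropWhile_not pvBlank xs
              rw [← hrows', hrows''] at this
              simpa using this
            rw [hrows''] at hrun
            rw [List.takeWhile_cons, if_pos (by simp [hx])] at hrun
            rw [hrun] at hr
            simp at hr
        have hmapne : run.map pvField ≠ [] := by simpa using hrun_ne
        have hfold2 : rows'.foldl pvStep ([], [])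
            = (rest.foldl pvStep ([run.map pvField], [])) := by
          rw [hsplit2, hrest, List.foldl_append,
            foldl_pvStep_nonblanks run hrunnb [] []]
          simp only [List.nil_append, List.foldl_cons]
          have hstepb : pvStep ([], run.map pvField) b
              = ([run.map pvField], []) := by
            unfold pvStep
            rw [if_pos (by simpa [pvBlank] using hb), if_pos hmapne]
            simp
          rw [hstepb]
        have hrestlen : rest.length ≤ n := by
          have h1 : rows'.length = run.length + (b :: rest).length := by
            conv_lhs => rw [hsplit2, hrest]
            simp
          have h2 : rows'.length ≤ xs.length := List.length_dropWhile_le _ _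
          simp at h1
          omega
        have hdrop : rows'.drop (run.length + 1) = rest := by
          conv_lhs => rw [hsplit2, hrest]
          simp [List.drop_append]
        rw [hfold1, hfold2, foldl_pvStep_fst, ih rest hrestlen]
        conv_rhs => rw [pvParse]
        simp only [← hrows', ← hrun, if_neg hlen, hdrop]
        simp

-- B's loop computes pvParse
set_option maxRecDepth 2048 in
theorem pvLoop_eq_parse (n : Nat) :
    ∀ (xs : List String) (records : List (List String)) (lo : Nat),
      lo ≤ xs.length → xs.length - lo ≤ n →
      pvLoop xs records lo = records ++ pvParse (xs.drop lo) := by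
  induction n with
  | zero =>
    intro xs records lo hlo hn
    have hlen : lo = xs.length := by omega
    have hdrop : xs.drop lo = [] := List.drop_eq_nil_of_le (by omega)
    have hadv1 : pvAdvance pvBlank xs lo = lo := by
      rw [pvAdvance_eq _ _ _ hlo, hdrop]; simp
    have hadv2 : pvAdvance (fun r => !pvBlank r) xs lo = lo := by
      rw [pvAdvance_eq _ _ _ hlo, hdrop]; simp
    rw [pvLoop]
    simp only [hadv1, hadv2, if_pos (by omega : xs.length ≤ lo)]
    rw [hdrop, pvParse]
    simp
  | succ n ih =>
    intro xs records lo hlo hn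
    set t1 := ((xs.drop lo).takeWhile pvBlank).length with ht1
    have ht1le : t1 ≤ xs.length - lo := by
      have := (List.takeWhile_prefix (p := pvBlank) (l := xs.drop lo)).length_le
      simpa [ht1] using this
    have hadv1 : pvAdvance pvBlank xs lo = lo + t1 := pvAdvance_eq _ _ _ hlo
    have hlo' : lo + t1 ≤ xs.length := by omega
    set rows' := (xs.drop lo).dropWhile pvBlank with hrows'
    have hrows'drop : rows' = xs.drop (lo + t1) := by
      rw [hrows', dropWhile_eq_drop_len, ← ht1, List.drop_drop]
    set run := rows'.takeWhile (fun r => !pvBlank r) with hrun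
    have hrunlen : run.length ≤ rows'.length :=
      (List.takeWhile_prefix (p := fun r => !pvBlank r) (l := rows')).length_le
    have hrows'len : rows'.length = xs.length - (lo + t1) := by
      rw [hrows'drop]; simp
    have hadv2 : pvAdvance (fun r => !pvBlank r) xs (lo + t1) = lo + t1 + run.length := by
      rw [pvAdvance_eq _ _ _ hlo', ← hrows'drop, ← hrun]
    rw [pvLoop]
    simp only [hadv1, hadv2]
    by_cases hterm : xs.length ≤ lo + t1 + run.length
    · -- run reaches end of list: B returns records; pvParse yields []
      rw [if_pos hterm, pvParse]
      simp only [← hrows', ← hrun]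
      rw [if_pos (by omega)]
      simp
    · rw [if_neg hterm]
      have hne : ¬ (run.length = rows'.length) := by omega
      have hslice : PySem.List.slice xs (some ((lo + t1 : Nat) : Int))
            (some ((lo + t1 + run.length : Nat) : Int))
          = (xs.drop (lo + t1)).take run.length := by
        rw [PySem.List.slice_natCast]
        congr 1
        omega
      have htake : (xs.drop (lo + t1)).take run.length = run := by
        rw [← hrows'drop, hrun, take_takeWhile_len]
      have hdropnext : rows'.drop (run.length + 1) = xs.drop (lo + t1 + run.length + 1) := by
        rw [hrows'drop, List.drop_drop]
        all_goals congr 1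
      rw [ih xs _ (lo + t1 + run.length + 1) (by omega) (by omega)]
      conv_rhs => rw [pvParse]
      simp only [← hrows', ← hrun, if_neg hne, hslice, htake, hdropnext]
      simp

-- ===== VERDICT =====
theorem get_rows_py_spec : Claim_equal_get_rows_py := by
  intro xs _
  unfold Spec_get_rows_py get_rows_py_alt
  rw [get_rows_py_eq_step, foldl_pvStep_eq_parse xs.length xs (le_refl _),
    pvLoop_eq_parse xs.length xs [] 0 (Nat.zero_le _) (by omega)]
  simp
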